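-- pv_equiv track=rewrite | github.com/Dorororodong/Algorithm | PG/Level1/예산.py | solution
-- ===== SOURCE A (Python) =====
-- def solution(d, budget):
--     d.sort()                # O(nlogn)
--     total = sum(d)          # O(n)
--     n = len(d)
--
--     if total <= budget:
--         return n
--
--     else:
--         for i in range(n - 1, 0, -1):        # O(n)
--             if total - d[i] <= budget:
--                 return i
--
--             else:
--                 total -= d[i]
--
--         return 0
-- ===== SOURCE B (Python) =====
-- def solution(d, budget):
--     # Same in-place d.sort() as A; single forward pass keeping the running
--     # prefix sum and the last count whose prefix still fits the budget,
--     # instead of A's full-sum-then-peel-from-the-back strategy.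
--     d.sort()
--     best = 0
--     total = 0
--     for i, x in enumerate(d, 1):
--         total += x
--         if total <= budget:
--             best = i
--     return best
-- ===== Notes on version B (the rewrite author's own statement) =====
-- stated objective: simpler
-- what changed: Replaces A's compute-the-full-sum-then-peel-largest-items-off-the-back loop by one forward pass over the sorted list that keeps a running prefix sum and remembers the largest count whose prefix fits the budget.
import Mathlib
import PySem

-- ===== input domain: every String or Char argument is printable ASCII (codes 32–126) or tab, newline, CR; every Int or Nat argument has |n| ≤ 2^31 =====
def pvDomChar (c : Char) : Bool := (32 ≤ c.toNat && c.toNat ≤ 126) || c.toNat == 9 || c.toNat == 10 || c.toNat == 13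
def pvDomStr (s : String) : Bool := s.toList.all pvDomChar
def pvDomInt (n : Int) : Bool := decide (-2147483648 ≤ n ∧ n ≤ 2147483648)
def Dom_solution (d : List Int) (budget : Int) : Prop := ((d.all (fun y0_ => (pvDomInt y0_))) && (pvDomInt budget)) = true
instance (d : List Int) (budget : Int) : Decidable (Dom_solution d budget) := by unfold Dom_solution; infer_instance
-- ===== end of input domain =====

-- B replaces A's full-sum-then-peel-from-the-back loop by one forward prefix-sum pass
-- over the sorted list (simpler). Both A and B sort the argument list in place in
-- Python; the equivalence proved here is about the return value.

-- ===== PORT A =====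
-- loop 'for i in range(n-1, 0, -1): ...' ; every index i accessed lies in 1..n-1,
-- so getD is exact for d[i] here (never out of range, never negative).
def solAuxA (s : List Int) (budget : Int) : Int → Nat → Int
  | _, 0 => 0
  | total, j+1 =>
      if total - s.getD (j+1) 0 ≤ budget then ((j : Int) + 1)
      else solAuxA s budget (total - s.getD (j+1) 0) j

def solution (d : List Int) (budget : Int) : Int :=
  let s := PySem.List.sorted d (fun x => x) false
  let total := s.foldl (· + ·) 0
  let n := s.length
  if total ≤ budget then (n : Int) else solAuxA s budget total (n - 1)

-- ===== PORT B =====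
-- 'for i, x in enumerate(d, 1): total += x; if total <= budget: best = i'
def altAux (budget : Int) : List Int → Int → Int → Int → Int
  | [], _, _, best => best
  | x :: rest, total, i, best =>
      altAux budget rest (total + x) (i + 1) (if total + x ≤ budget then i + 1 else best)

def solution_alt (d : List Int) (budget : Int) : Int :=
  altAux budget (PySem.List.sorted d (fun x => x) false) 0 0 0

-- ===== PRECONDITION & SPEC =====
def Spec_solution (d : List Int) (budget : Int) (out : Int) : Prop := out = solution_alt d budget
instance (d : List Int) (budget : Int) (out : Int) : Decidable (Spec_solution d budget out) := by unfold Spec_solution; infer_instance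

-- ===== CLAIM (what is proved, stated in full; the proofs are below) =====
def Claim_equal_solution : Prop := ∀ (d : List Int) (budget : Int), Dom_solution d budget → Spec_solution d budget (solution d budget)

-- ===== LEMMAS AND PROOFS =====

-- common reference value: best count over prefixes 1..j, scanned from the top
def aspec (s : List Int) (budget : Int) : Nat → Int
  | 0 => 0
  | j+1 => if (s.take (j+1)).sum ≤ budget then ((j : Int) + 1) else aspec s budget j

theorem sum_take_succ (s : List Int) (k : Nat) (x : Int) (t : List Int)
    (h : s.drop k = x :: t) : (s.take (k+1)).sum = (s.take k).sum + x := by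
  have hk : k < s.length := by
    by_contra hk
    simp [List.drop_eq_nil_of_le (Nat.le_of_not_lt hk)] at h
  have hx : s[k] = x := by
    have h0 : (s.drop k)[0]? = some x := by rw [h]; rfl
    rw [List.getElem?_drop] at h0
    simpa using (List.getElem?_eq_getElem hk).symm.trans h0
  rw [List.take_add_one, List.getElem?_eq_getElem hk]
  simp [hx]

theorem lemA (s : List Int) (budget : Int) :
    ∀ i, i < s.length → solAuxA s budget ((s.take (i+1)).sum) i = aspec s budget i := by
  intro i
  induction i with
  | zero => intro _; simp [solAuxA, aspec]
  | succ j ih =>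
      intro hlt
      have hj1 : j + 1 < s.length := hlt
      have hget : s.getD (j+1) 0 = s[j+1] := List.getD_eq_getElem s 0 hj1
      have hdrop : s.drop (j+1) = s[j+1] :: s.drop (j+2) := by
        exact (List.drop_eq_getElem_cons hj1)
      have hsum : (s.take (j+2)).sum = (s.take (j+1)).sum + s[j+1] :=
        sum_take_succ s (j+1) _ _ hdrop
      show solAuxA s budget ((s.take (j+2)).sum) (j+1) = aspec s budget (j+1)
      rw [solAuxA, hget, hsum]
      have hsub : (s.take (j+1)).sum + s[j+1] - s[j+1] = (s.take (j+1)).sum := by ring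
      rw [hsub, aspec]
      split
      · rfl
      · exact ih (Nat.lt_of_succ_lt hlt)

theorem lemB (s : List Int) (budget : Int) :
    ∀ t k, k ≤ s.length → t = s.drop k →
      altAux budget t ((s.take k).sum) (k : Int) (aspec s budget k) =
        aspec s budget s.length := by
  intro t
  induction t with
  | nil =>
      intro k hk hdrop
      have : s.length ≤ k := by
        by_contra hlt
        rw [List.drop_eq_getElem_cons (Nat.lt_of_not_le hlt)] at hdrop
        simp at hdrop
        omega
      have : k = s.length := Nat.le_antisymm hk this
      subst this
      simp [altAux]
  | cons x t ih =>
      intro k hk hdrop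
      have hsum : (s.take (k+1)).sum = (s.take k).sum + x :=
        sum_take_succ s k x t hdrop.symm
      have hk1 : k + 1 ≤ s.length := by
        by_contra hle
        have : s.length ≤ k := by omega
        rw [List.drop_eq_nil_of_le this] at hdrop
        simp at hdrop
      have hdrop1 : t = s.drop (k+1) := by
        have := congrArg (List.drop 1) hdrop
        simpa [List.drop_drop, Nat.add_comm] using this
      rw [altAux]
      have hbest : (if (s.take k).sum + x ≤ budget then (k : Int) + 1
          else aspec s budget k) = aspec s budget (k+1) := by
        rw [aspec, hsum]
      rw [hbest, ← hsum]
      have := ih (k+1) hk1 hdrop1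
      simpa [Nat.cast_add] using this

theorem foldl_add_eq_sum (s : List Int) : s.foldl (· + ·) 0 = s.sum := by
  simp [List.sum_eq_foldl]

theorem main_eq (d : List Int) (budget : Int) :
    solution d budget = solution_alt d budget := by
  show (let s := PySem.List.sorted d (fun x => x) false;
        let total := s.foldl (· + ·) 0;
        let n := s.length;
        if total ≤ budget then (n : Int) else solAuxA s budget total (n - 1)) =
      altAux budget (PySem.List.sorted d (fun x => x) false) 0 0 0
  set s := PySem.List.sorted d (fun x => x) false with hs
  simp only
  have hB : altAux budget s 0 0 0 = aspec s budget s.length := by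
    have := lemB s budget s 0 (Nat.zero_le _) rfl
    simpa [aspec] using this
  rw [hB, foldl_add_eq_sum]
  cases hn : s.length with
  | zero =>
      have hnil : s = [] := List.eq_nil_of_length_eq_zero hn
      simp [hnil, aspec, solAuxA]
  | succ j =>
      have hsum_all : s.sum = (s.take (j+1)).sum := by
        rw [← hn, List.take_length]
      have hj : j < s.length := by omega
      rw [hsum_all, aspec]
      split
      · simp
      · simpa using lemA s budget j hj

-- ===== VERDICT (by name: the statement is the Claim_ definition above) =====
theorem solution_spec : Claim_equal_solution := by
  intro d budget _
  show solution d budget = solution_alt d budget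
  exact main_eq d budget
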